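-- pv_equiv track=rewrite | github.com/berkanteber/advent-of-code-2024 | day_07/part_2.py | _check
-- ===== SOURCE A (Python) =====
-- def _check(val: int, nums: list[int]) -> bool:
--     if len(nums) == 0:
--         return val == 0
--
--     if len(nums) == 1:
--         return nums[0] == val
--
--     if nums[0] > val:
--         return False
--
--     return any((
--         _check(val, [int(str(nums[0]) + str(nums[1]))] + nums[2:]),
--         _check(val, [nums[0] * nums[1]] + nums[2:]),
--         _check(val, [nums[0] + nums[1]] + nums[2:]),
--     ))
-- ===== SOURCE B (Python) =====
-- def _check(val: int, nums: list[int]) -> bool: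
--     if not nums:
--         return val == 0
--     vals = {nums[0]}
--     for n in nums[1:]:
--         vals = {w for v in vals if v <= val
--                 for w in (int(str(v) + str(n)), v * n, v + n)}
--         if not vals:
--             return False
--     return val in vals
-- ===== Notes on version B (the rewrite author's own statement) =====
-- stated objective: faster
-- what changed: Replaces A's exponential three-way recursion with a single left-to-right pass keeping the deduplicated set of reachable prefix values (pruned at v <= val, early False on an empty set), then testing membership of the target; intended as faster — a timing run measured a median ~12x at the largest size, though not uniformly across inputs.
-- outside the precondition, e.g. on _check(5, [3, 4, -2]): A returns False, B returns False
import Mathlib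
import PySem

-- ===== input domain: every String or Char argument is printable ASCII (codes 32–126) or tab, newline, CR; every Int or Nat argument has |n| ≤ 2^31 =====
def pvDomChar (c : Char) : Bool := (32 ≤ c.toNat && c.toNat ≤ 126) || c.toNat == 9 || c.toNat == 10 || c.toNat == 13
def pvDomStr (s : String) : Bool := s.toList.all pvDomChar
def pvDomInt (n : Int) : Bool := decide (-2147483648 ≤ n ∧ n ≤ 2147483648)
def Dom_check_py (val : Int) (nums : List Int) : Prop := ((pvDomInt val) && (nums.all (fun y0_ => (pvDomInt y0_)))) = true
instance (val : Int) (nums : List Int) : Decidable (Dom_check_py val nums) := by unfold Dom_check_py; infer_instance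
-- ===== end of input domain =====

-- B replaces A's exponential three-way recursion by one pass keeping the deduplicated set of reachable
-- prefix values; intended as faster (a timing run measured a median ~12x at its largest size, not uniformly).

-- ===== PORT A =====
-- int(str(a) + str(b)); Python raises ValueError when the parse fails (b < 0) — those inputs are outside Pre_
def pyConcat (a b : Int) : Int :=
  (PySem.Int.ofStr? (PySem.Int.toStr a ++ PySem.Int.toStr b)).getD 0

def check_py (val : Int) (nums : List Int) : Bool :=
  match nums with
  | [] => val == 0
  | [a] => a == val
  | a :: b :: rest =>
    if a > val then false
    else
      (check_py val (pyConcat a b :: rest) ||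
       check_py val ((a * b) :: rest) ||
       check_py val ((a + b) :: rest))
termination_by nums.length

-- ===== PORT B =====
-- {w for v in vals if v <= val for w in (int(str(v)+str(n)), v*n, v+n)}
def stepB (val : Int) (vals : PySem.Set Int) (n : Int) : PySem.Set Int :=
  vals.foldl
    (fun acc v =>
      if v ≤ val then
        PySem.Set.add (PySem.Set.add (PySem.Set.add acc (pyConcat v n)) (v * n)) (v + n)
      else acc)
    PySem.Set.empty

-- the for-loop with its early 'return False' on an empty reachable set
def loopB (val : Int) : List Int → PySem.Set Int → Bool
  | [], vals => PySem.Set.contains vals val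
  | n :: rest, vals =>
    let vals' := stepB val vals n
    if vals' = [] then false else loopB val rest vals'

def check_py_alt (val : Int) (nums : List Int) : Bool :=
  match nums with
  | [] => val == 0
  | a :: rest => loopB val rest (PySem.Set.ofList [a])

-- ===== PRECONDITION & SPEC =====
-- Pre_ excludes lists with a negative element after the first and whose head does not already exceed
-- the target: there int(str(v)+str(n)) can reach a string like "3-4" and A raises ValueError
-- (A still returns on a few such inputs when every surviving prefix value is pruned before the
-- negative element is consumed; that set is not expressible without re-running the search).
def Pre_check_py (val : Int) (nums : List Int) : Prop :=
  (∀ x ∈ nums.drop 1, 0 ≤ x) ∨ (∃ a ∈ nums.take 1, val < a)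
instance (val : Int) (nums : List Int) : Decidable (Pre_check_py val nums) := by
  unfold Pre_check_py; infer_instance

def pvWitness_check_py : Int × List Int := (190, [19, 10])

def Spec_check_py (val : Int) (nums : List Int) (out : Bool) : Prop := out = check_py_alt val nums
instance (val : Int) (nums : List Int) (out : Bool) : Decidable (Spec_check_py val nums out) := by unfold Spec_check_py; infer_instance

-- ===== CLAIM (what is proved, stated in full; the proofs are below) =====
def Claim_equal_check_py : Prop := ∀ (val : Int) (nums : List Int), Dom_check_py val nums → Pre_check_py val nums → Spec_check_py val nums (check_py val nums)

-- ===== LEMMAS AND PROOFS =====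

theorem mem_foldl_stepB (val n w : Int) (l acc : List Int) :
    w ∈ l.foldl
      (fun acc v =>
        if v ≤ val then
          PySem.Set.add (PySem.Set.add (PySem.Set.add acc (pyConcat v n)) (v * n)) (v + n)
        else acc) acc ↔
    w ∈ acc ∨ ∃ v ∈ l, v ≤ val ∧ (w = pyConcat v n ∨ w = v * n ∨ w = v + n) := by
  induction l generalizing acc with
  | nil => simp
  | cons x xs ih =>
    simp only [List.foldl_cons]
    rw [ih]
    by_cases hx : x ≤ val
    · rw [if_pos hx]
      simp only [PySem.Set.mem_add, List.mem_cons]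
      constructor
      · rintro ((((h | h) | h) | h) | ⟨v, hv, hle, hc⟩)
        · exact Or.inl h
        · exact Or.inr ⟨x, Or.inl rfl, hx, Or.inl h⟩
        · exact Or.inr ⟨x, Or.inl rfl, hx, Or.inr (Or.inl h)⟩
        · exact Or.inr ⟨x, Or.inl rfl, hx, Or.inr (Or.inr h)⟩
        · exact Or.inr ⟨v, Or.inr hv, hle, hc⟩
      · rintro (h | ⟨v, hv, hle, hc⟩)
        · exact Or.inl (Or.inl (Or.inl (Or.inl h)))
        · rcases hv with rfl | hv
          · rcases hc with h | h | h
            · exact Or.inl (Or.inl (Or.inl (Or.inr h)))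
            · exact Or.inl (Or.inl (Or.inr h))
            · exact Or.inl (Or.inr h)
          · exact Or.inr ⟨v, hv, hle, hc⟩
    · rw [if_neg hx]
      simp only [List.mem_cons]
      constructor
      · rintro (h | ⟨v, hv, hle, hc⟩)
        · exact Or.inl h
        · exact Or.inr ⟨v, Or.inr hv, hle, hc⟩
      · rintro (h | ⟨v, hv, hle, hc⟩)
        · exact Or.inl h
        · rcases hv with rfl | hv
          · exact absurd hle hx
          · exact Or.inr ⟨v, hv, hle, hc⟩

theorem mem_stepB (val n w : Int) (S : PySem.Set Int) :
    w ∈ stepB val S n ↔ ∃ v ∈ S, v ≤ val ∧ (w = pyConcat v n ∨ w = v * n ∨ w = v + n) := by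
  unfold stepB
  rw [mem_foldl_stepB]
  simp [PySem.Set.empty]

theorem foldl_stepB_nil (val : Int) (rest : List Int) :
    rest.foldl (stepB val) [] = [] := by
  induction rest with
  | nil => rfl
  | cons n rest ih => simpa using ih

theorem loopB_eq_foldl (val : Int) (rest : List Int) (S : PySem.Set Int) :
    loopB val rest S = PySem.Set.contains (rest.foldl (stepB val) S) val := by
  induction rest generalizing S with
  | nil => rfl
  | cons n rest ih =>
    rw [loopB, List.foldl_cons]
    by_cases h : stepB val S n = []
    · rw [if_pos h, h, foldl_stepB_nil]; rfl
    · rw [if_neg h, ih]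

theorem key_lemma (val : Int) (rest : List Int) (S : PySem.Set Int) :
    (PySem.Set.contains (rest.foldl (stepB val) S) val = true) ↔
    ∃ v ∈ S, check_py val (v :: rest) = true := by
  induction rest generalizing S with
  | nil =>
    simp only [List.foldl_nil, PySem.Set.contains_iff]
    constructor
    · intro h; exact ⟨val, h, by rw [check_py]; simp⟩
    · rintro ⟨v, hv, hc⟩
      rw [check_py] at hc; simp only [beq_iff_eq] at hc
      exact hc ▸ hv
  | cons n rest' ih =>
    simp only [List.foldl_cons]
    rw [ih]
    constructor
    · rintro ⟨w, hw, hcw⟩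
      rw [mem_stepB] at hw
      obtain ⟨v, hvS, hvle, hcase⟩ := hw
      refine ⟨v, hvS, ?_⟩
      rw [check_py]
      have hngt : ¬ v > val := by omega
      simp only [hngt, if_false, Bool.or_eq_true]
      rcases hcase with h | h | h <;> subst h <;> tauto
    · rintro ⟨v, hvS, hc⟩
      rw [check_py] at hc
      by_cases hgt : v > val
      · simp [hgt] at hc
      · simp only [hgt, if_false, Bool.or_eq_true] at hc
        have hvle : v ≤ val := by omega
        rcases hc with (h | h) | h
        · exact ⟨pyConcat v n, (mem_stepB val n _ S).2 ⟨v, hvS, hvle, Or.inl rfl⟩, h⟩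
        · exact ⟨v * n, (mem_stepB val n _ S).2 ⟨v, hvS, hvle, Or.inr (Or.inl rfl)⟩, h⟩
        · exact ⟨v + n, (mem_stepB val n _ S).2 ⟨v, hvS, hvle, Or.inr (Or.inr rfl)⟩, h⟩

-- ===== VERDICT (by name: the statement is the Claim_ definition above) =====
theorem check_py_spec : Claim_equal_check_py := by
  intro val nums _hdom _hpre
  unfold Spec_check_py
  cases nums with
  | nil => rw [check_py]; rfl
  | cons a rest =>
    have h := key_lemma val rest (PySem.Set.ofList [a])
    have hset : PySem.Set.ofList [a] = [a] := rfl
    rw [hset] at h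
    simp only [List.mem_singleton, exists_eq_left] at h
    have hr : check_py_alt val (a :: rest) = loopB val rest (PySem.Set.ofList [a]) := rfl
    rw [hr, loopB_eq_foldl, hset]
    cases hb : check_py val (a :: rest) <;>
      cases hb2 : PySem.Set.contains (rest.foldl (stepB val) [a]) val <;> simp_all
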